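-- pv_equiv track=rewrite | github.com/fnareoh/algorithms-on-strings | Gusfield_exercises/chp1/exo4.py | find_maximal_tandem
-- ===== SOURCE A (Python) =====
-- import math
--
-- def Z_algo(S):
-- 	n = len(S)
-- 	Z = [0 for i in range(n)]
-- 	Z[0] = n
-- 	r = l = 0
-- 	for k in range(1,n):
-- 		if k > r :
-- 			z_k = 0
-- 			while k + z_k < n and S[z_k] == S[k + z_k]:
-- 				z_k += 1
-- 			Z[k] = z_k
-- 			if z_k > 0 :
-- 				l = k
-- 				r = k + z_k - 1
-- 		else:
-- 			k2 = k - l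
-- 			if Z[k2] < r-k+1:
-- 				Z[k] = Z[k2]
-- 			else :
-- 				z_k = r-k+1
-- 				while k + z_k < n and S[z_k] == S[k + z_k]:
-- 					z_k += 1
-- 				Z[k] = z_k
-- 				l = k
-- 				r = k + z_k - 1
-- 	return Z
--
-- def find_maximal_tandem(beta, S):
--     n = len(S)
--     p = len(beta)
--     power_beta = math.ceil(n/p)
--     Z = Z_algo(beta*power_beta+"#"+S)
--
--     maximals = []
--     p_max = -1
--     r_max = -1
--     for i in range(p*power_beta+1,len(Z)):
--         if Z[i]//p > 1:
--             end_i = Z[i] - (Z[i] % p)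
--             if (i + end_i  > r_max) :
--                 maximals.append((i- (p*power_beta+1),Z[i]//p))
--                 p_max = i
--                 r_max = i + end_i
--             elif  i - p_max < p:
--                 maximals.append((i- (p*power_beta+1),Z[i]//p))
--     return maximals
-- ===== SOURCE B (Python) =====
-- def find_maximal_tandem(beta, S):
--     n = len(S)
--     p = len(beta)
--     # count[j] = number of consecutive full copies of beta starting at S[j]
--     count = [0] * (n + p)
--     for j in range(n - 1, -1, -1):
--         if S[j:j + p] == beta:
--             count[j] = 1 + count[j + p]
--     maximals = []
--     p_max = -1
--     r_max = -1
--     for j in range(n):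
--         if count[j] > 1:
--             end_j = count[j] * p
--             if j + end_j > r_max:
--                 maximals.append((j, count[j]))
--                 p_max = j
--                 r_max = j + end_j
--             elif j - p_max < p:
--                 maximals.append((j, count[j]))
--     return maximals
-- ===== Notes on version B (the rewrite author's own statement) =====
-- stated objective: alternative
-- what changed: Replaced the Z-algorithm over the concatenation beta*ceil(n/p)+'#'+S by a direct reverse dynamic program count[j] = 1 + count[j+p] when beta occurs at j, feeding the same maximality filter; no concatenated auxiliary string is ever built (trades the Z bookkeeping for per-position slice comparisons).
-- outside the precondition, e.g. on find_maximal_tandem('', 'abc'): A raises ZeroDivisionError, B returns []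
import Mathlib
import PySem

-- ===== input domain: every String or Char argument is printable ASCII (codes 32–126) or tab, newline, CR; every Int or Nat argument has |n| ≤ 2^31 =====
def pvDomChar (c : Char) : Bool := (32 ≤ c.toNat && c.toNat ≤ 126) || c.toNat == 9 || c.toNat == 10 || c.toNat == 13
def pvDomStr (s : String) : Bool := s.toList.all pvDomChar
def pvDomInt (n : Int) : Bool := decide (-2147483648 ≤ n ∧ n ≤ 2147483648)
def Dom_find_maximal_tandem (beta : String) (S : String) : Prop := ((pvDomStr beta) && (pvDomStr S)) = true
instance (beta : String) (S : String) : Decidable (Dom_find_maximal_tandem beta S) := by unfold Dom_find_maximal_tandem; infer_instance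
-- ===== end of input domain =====

-- B replaces A's Z-algorithm over beta*ceil(n/p)+'#'+S by a reverse DP counting
-- consecutive beta-copies directly in S (objective: alternative algorithm, no
-- concatenated auxiliary string).

-- ===== PORT A =====
-- All Python ints here are provably nonnegative (indices, lengths, Z-values), so Nat is
-- used; every list read is in range in A, ported as getD with a default never returned.

-- the inner `while k + z_k < n and S[z_k] == S[k + z_k]: z_k += 1` of Z_algo
def zExtend (T : List Char) (k z : Nat) : Nat :=
  if h : k + z < T.length ∧ T.getD z ' ' = T.getD (k + z) ' ' then
    zExtend T k (z + 1)
  else z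
termination_by T.length - (k + z)
decreasing_by omega

-- the `for k in range(1, n)` loop of Z_algo with its state (Z, l, r)
def zLoop (T : List Char) (n k : Nat) (Z : List Nat) (l r : Nat) : List Nat :=
  if k < n then
    if r < k then  -- Python: k > r
      let z := zExtend T k 0
      zLoop T n (k + 1) (Z.set k z) (if 0 < z then k else l) (if 0 < z then k + z - 1 else r)
    else
      let k2 := k - l
      if Z.getD k2 0 < r - k + 1 then
        zLoop T n (k + 1) (Z.set k (Z.getD k2 0)) l r
      else
        let z := zExtend T k (r - k + 1)
        zLoop T n (k + 1) (Z.set k z) k (k + z - 1)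
  else Z
termination_by n - k

def Z_algo (T : List Char) : List Nat :=
  let n := T.length
  zLoop T n 1 ((List.replicate n 0).set 0 n) 0 0

-- the `for i in range(p*power_beta+1, len(Z))` loop with state (maximals, p_max, r_max)
def aLoop (Z : List Nat) (p base stop i : Nat) (ms : List (Int × Int))
    (p_max r_max : Int) : List (Int × Int) :=
  if i < stop then
    let zi := Z.getD i 0
    if 1 < zi / p then
      let endi := zi - zi % p
      if (i : Int) + (endi : Int) > r_max then
        aLoop Z p base stop (i + 1) (ms ++ [((i : Int) - (base : Int), ((zi / p : Nat) : Int))])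
          (i : Int) ((i : Int) + (endi : Int))
      else if (i : Int) - p_max < (p : Int) then
        aLoop Z p base stop (i + 1) (ms ++ [((i : Int) - (base : Int), ((zi / p : Nat) : Int))])
          p_max r_max
      else aLoop Z p base stop (i + 1) ms p_max r_max
    else aLoop Z p base stop (i + 1) ms p_max r_max
  else ms
termination_by stop - i

def find_maximal_tandem (beta : String) (S : String) : List (Int × Int) :=
  let Sl := S.toList
  let bl := beta.toList
  let n := Sl.length
  let p := bl.length
  -- math.ceil(n/p): exact for p ≥ 1 (Pre_ excludes p = 0, where Python raises)
  let power_beta := (n + p - 1) / p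
  let T := (List.replicate power_beta bl).flatten ++ '#' :: Sl   -- beta*power_beta + "#" + S
  let Z := Z_algo T
  aLoop Z p (p * power_beta + 1) Z.length (p * power_beta + 1) [] (-1) (-1)

-- ===== PORT B =====
-- occAt Sl bl p j = Python's `S[j:j+p] == beta` (slice in range for 0 ≤ j ≤ n)
def occAt (Sl bl : List Char) (p j : Nat) : Bool := (Sl.drop j).take p == bl

-- `for j in range(n-1, -1, -1): if occ: count[j] = 1 + count[j+p]` (first arg = number
-- of indices still to process, counting down)
def buildCount (Sl bl : List Char) (p : Nat) : Nat → List Nat → List Nat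
  | 0, c => c
  | j + 1, c =>
    buildCount Sl bl p j (if occAt Sl bl p j then c.set j (1 + c.getD (j + p) 0) else c)

-- the `for j in range(n)` filter loop with state (maximals, p_max, r_max)
def bLoop (count : List Nat) (p n j : Nat) (ms : List (Int × Int))
    (p_max r_max : Int) : List (Int × Int) :=
  if j < n then
    let cj := count.getD j 0
    if 1 < cj then
      let endj := cj * p
      if (j : Int) + (endj : Int) > r_max then
        bLoop count p n (j + 1) (ms ++ [((j : Int), (cj : Int))]) (j : Int) ((j : Int) + (endj : Int))
      else if (j : Int) - p_max < (p : Int) then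
        bLoop count p n (j + 1) (ms ++ [((j : Int), (cj : Int))]) p_max r_max
      else bLoop count p n (j + 1) ms p_max r_max
    else bLoop count p n (j + 1) ms p_max r_max
  else ms
termination_by n - j

def find_maximal_tandem_alt (beta : String) (S : String) : List (Int × Int) :=
  let Sl := S.toList
  let bl := beta.toList
  let n := Sl.length
  let p := bl.length
  let count := buildCount Sl bl p n (List.replicate (n + p) 0)
  bLoop count p n 0 [] (-1) (-1)

-- ===== PRECONDITION & SPEC =====
-- Pre_ excludes exactly the empty pattern beta = "", on which Python A raises
-- ZeroDivisionError at math.ceil(n/p); no input A returns on is excluded.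
def Pre_find_maximal_tandem (beta : String) (S : String) : Prop := beta ≠ ""
instance (beta : String) (S : String) : Decidable (Pre_find_maximal_tandem beta S) := by
  unfold Pre_find_maximal_tandem; infer_instance

def pvWitness_find_maximal_tandem : String × String := ("ab", "abababxab")

def Spec_find_maximal_tandem (beta : String) (S : String) (out : List (Int × Int)) : Prop :=
  out = find_maximal_tandem_alt beta S
instance (beta : String) (S : String) (out : List (Int × Int)) :
    Decidable (Spec_find_maximal_tandem beta S out) := by
  unfold Spec_find_maximal_tandem; infer_instance

-- ===== CLAIM (what is proved, stated in full; the proofs are below) =====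
def Claim_equal_find_maximal_tandem : Prop := ∀ (beta : String) (S : String),
  Dom_find_maximal_tandem beta S → Pre_find_maximal_tandem beta S →
    Spec_find_maximal_tandem beta S (find_maximal_tandem beta S)

-- ===== LEMMAS AND PROOFS =====

def lcp : List Char → List Char → Nat
  | a :: as, b :: bs => if a = b then lcp as bs + 1 else 0
  | _, _ => 0

theorem lcp_nil_right (u : List Char) : lcp u [] = 0 := by cases u <;> rfl

theorem lcp_le_left (u v : List Char) : lcp u v ≤ u.length := by
  induction u generalizing v with
  | nil => simp [lcp]
  | cons a as ih =>
    cases v with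
    | nil => simp [lcp]
    | cons b bs => simp only [lcp]; split <;> simp [ih]

theorem lcp_le_right (u v : List Char) : lcp u v ≤ v.length := by
  induction u generalizing v with
  | nil => simp [lcp]
  | cons a as ih =>
    cases v with
    | nil => simp [lcp]
    | cons b bs => simp only [lcp]; split <;> simp [ih]

theorem lcp_refl (u : List Char) : lcp u u = u.length := by
  induction u with
  | nil => rfl
  | cons a as ih => simp [lcp, ih]

theorem lcp_getD (u v : List Char) (t : Nat) (h : t < lcp u v) (d : Char) :
    u.getD t d = v.getD t d := by
  induction u generalizing v t with
  | nil => simp [lcp] at h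
  | cons a as ih =>
    cases v with
    | nil => simp [lcp] at h
    | cons b bs =>
      simp only [lcp] at h
      split at h
      · cases t with
        | zero => simpa using ‹a = b›
        | succ t => exact ih bs t (by omega) 
      · omega

theorem lcp_mismatch (u v : List Char) (h1 : lcp u v < u.length) (h2 : lcp u v < v.length)
    (d : Char) : u.getD (lcp u v) d ≠ v.getD (lcp u v) d := by
  induction u generalizing v with
  | nil => simp at h1
  | cons a as ih =>
    cases v with
    | nil => simp at h2
    | cons b bs =>
      by_cases hab : a = b
      · simp only [lcp, if_pos hab, List.length_cons, List.getD_cons_succ] at h1 h2 ⊢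
        exact ih bs (by omega) (by omega)
      · simpa [lcp, if_neg hab] using hab

theorem lcp_ge (c : Nat) (u v : List Char) (hu : c ≤ u.length) (hv : c ≤ v.length)
    (h : ∀ t, t < c → u.getD t ' ' = v.getD t ' ') : c ≤ lcp u v := by
  induction c generalizing u v with
  | zero => omega
  | succ c ih =>
    cases u with
    | nil => simp at hu
    | cons a as =>
      cases v with
      | nil => simp at hv
      | cons b bs =>
        have hab : a = b := by have := h 0 (by omega); simpa using this
        simp only [lcp, if_pos hab]
        have : c ≤ lcp as bs := by
          apply ih as bs (by simpa using hu) (by simpa using hv)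
          intro t ht; have := h (t+1) (by omega); simpa using this
        omega

theorem lcp_add (c : Nat) (u v : List Char) (hu : c ≤ u.length) (hv : c ≤ v.length)
    (h : ∀ t, t < c → u.getD t ' ' = v.getD t ' ') :
    lcp u v = c + lcp (u.drop c) (v.drop c) := by
  induction c generalizing u v with
  | zero => simp
  | succ c ih =>
    cases u with
    | nil => simp at hu
    | cons a as =>
      cases v with
      | nil => simp at hv
      | cons b bs =>
        have hab : a = b := by have := h 0 (by omega); simpa using this
        simp only [lcp, if_pos hab, List.drop_succ_cons]
        have := ih as bs (by simpa using hu) (by simpa using hv)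
          (fun t ht => by have := h (t+1) (by omega); simpa using this)
        omega

theorem lcp_eq (c : Nat) (u v : List Char) (hu : c ≤ u.length) (hv : c ≤ v.length)
    (h : ∀ t, t < c → u.getD t ' ' = v.getD t ' ')
    (hm : c = u.length ∨ c = v.length ∨ u.getD c ' ' ≠ v.getD c ' ') : lcp u v = c := by
  have hge := lcp_ge c u v hu hv h
  rcases hm with hm | hm | hm
  · have := lcp_le_left u v; omega
  · have := lcp_le_right u v; omega
  · by_contra hne
    have hlt : c < lcp u v := by omega
    exact hm (lcp_getD u v c hlt ' ')

theorem getD_drop (T : List Char) (l s : Nat) (d : Char) :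
    (T.drop l).getD s d = T.getD (l + s) d := by
  simp [List.getD, List.getElem?_drop]

theorem getD_set_ne (Z : List Nat) (k m a : Nat) (h : m ≠ k) (d : Nat) :
    (Z.set k a).getD m d = Z.getD m d := by
  simp [List.getD, List.getElem?_set_ne (Ne.symm h)]

theorem getD_set_self (Z : List Nat) (k a : Nat) (h : k < Z.length) (d : Nat) :
    (Z.set k a).getD k d = a := by
  simp [List.getD, h]

theorem zExtend_spec (T : List Char) (k : Nat) (hk : 1 ≤ k) (z : Nat) :
    zExtend T k z = z + lcp (T.drop z) (T.drop (k + z)) := by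
  fun_induction zExtend T k z with
  | case1 z h ih =>
    have hz : z < T.length := by omega
    have hkz : k + z < T.length := h.1
    have e1 : T.drop z = T[z] :: T.drop (z + 1) := List.drop_eq_getElem_cons hz
    have e2 : T.drop (k + z) = T[k + z] :: T.drop (k + z + 1) := List.drop_eq_getElem_cons hkz
    have heq : T[z] = T[k + z] := by
      have := h.2
      rwa [List.getD, List.getElem?_eq_getElem hz, List.getD, List.getElem?_eq_getElem hkz] at this
    rw [ih, e1, e2]
    simp only [lcp, if_pos heq]
    have : k + (z + 1) = k + z + 1 := by omega
    rw [this]; omega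
  | case2 z h =>
    rcases Decidable.em (k + z < T.length) with hlt | hge
    · have hz : z < T.length := by omega
      have hne : T.getD z ' ' ≠ T.getD (k + z) ' ' := fun he => h ⟨hlt, he⟩
      have e1 : T.drop z = T[z] :: T.drop (z + 1) := List.drop_eq_getElem_cons hz
      have e2 : T.drop (k + z) = T[k + z] :: T.drop (k + z + 1) := List.drop_eq_getElem_cons hlt
      have hne' : T[z] ≠ T[k + z] := by
        intro he; apply hne
        rw [List.getD, List.getElem?_eq_getElem hz, List.getD, List.getElem?_eq_getElem hlt]
        simpa using he
      rw [e1, e2]; simp [lcp, hne']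
    · have : T.drop (k + z) = [] := List.drop_eq_nil_of_le (by omega)
      rw [this, lcp_nil_right]
      omega

def ZGood (T : List Char) (Z : List Nat) (k : Nat) : Prop :=
  Z.length = T.length ∧ ∀ m, m < k → Z.getD m 0 = lcp T (T.drop m)

def LRInv (T : List Char) (l r k : Nat) : Prop :=
  (l = 0 ∧ r = 0) ∨ (1 ≤ l ∧ l < k ∧ l ≤ r ∧ r + 1 ≤ l + lcp T (T.drop l))

theorem lcp_getD' (T : List Char) (m t : Nat) (h : t < lcp T (T.drop m)) :
    T.getD t ' ' = T.getD (m + t) ' ' := by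
  have := lcp_getD T (T.drop m) t h ' '
  rwa [getD_drop] at this

theorem zExtend_lcp (T : List Char) (k : Nat) (hk : 1 ≤ k) :
    zExtend T k 0 = lcp T (T.drop k) := by
  have := zExtend_spec T k hk 0
  simpa using this

-- preservation of ZGood by writing the correct value at k

theorem ZGood_set (T : List Char) (Z : List Nat) (k : Nat) (hk : k < T.length)
    (hg : ZGood T Z k) (v : Nat) (hv : v = lcp T (T.drop k)) :
    ZGood T (Z.set k v) (k + 1) := by
  obtain ⟨hlen, hold⟩ := hg
  refine ⟨by simpa using hlen, fun m hm => ?_⟩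
  rcases Decidable.em (m = k) with rfl | hne
  · rw [getD_set_self Z m v (by omega), hv]
  · rw [getD_set_ne Z k m v hne, hold m (by omega)]

theorem zLoop_good (T : List Char) (fuel : Nat) : ∀ (k : Nat), T.length - k ≤ fuel →
    ∀ (Z : List Nat) (l r : Nat), 1 ≤ k → ZGood T Z k → LRInv T l r k →
    ZGood T (zLoop T T.length k Z l r) T.length := by
  induction fuel with
  | zero =>
    intro k hf Z l r hk hg hi
    rw [zLoop]
    have : ¬ (k < T.length) := by omega
    simp only [this, if_false]
    exact ⟨hg.1, fun m hm => hg.2 m (by omega)⟩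
  | succ fuel ih =>
    intro k hf Z l r hk hg hi
    rw [zLoop]
    rcases Decidable.em (k < T.length) with hkn | hkn
    · simp only [hkn, if_true]
      rcases Decidable.em (r < k) with hrk | hrk
      · -- branch k > r : fresh scan from 0
        simp only [hrk, if_true]
        have hz : zExtend T k 0 = lcp T (T.drop k) := zExtend_lcp T k hk
        apply ih (k+1) (by omega) _ _ _ (by omega) (ZGood_set T Z k hkn hg _ hz)
        rcases Decidable.em (0 < zExtend T k 0) with hpos | hpos
        · simp only [hpos, if_true]
          right
          refine ⟨hk, by omega, by omega, by omega⟩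
        · simp only [hpos, if_false]
          rcases hi with ⟨h1, h2⟩ | ⟨h1, h2, h3, h4⟩
          · exact Or.inl ⟨h1, h2⟩
          · exact Or.inr ⟨h1, by omega, h3, h4⟩
      · -- branch k ≤ r
        simp only [hrk, if_false]
        -- the invariant's right disjunct must hold
        rcases hi with ⟨hl0, hr0⟩ | ⟨hl1, hlk, hlr, hrL⟩
        · omega
        have hLle : lcp T (T.drop l) ≤ T.length - l := by
          have := lcp_le_right T (T.drop l); simpa using this
        have hrn : r < T.length := by omega
        set k2 := k - l with hk2
        have hk2k : k2 < k := by omega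
        have hc : Z.getD k2 0 = lcp T (T.drop k2) := hg.2 k2 hk2k
        set c := Z.getD k2 0 with hcdef
        have hcle : c ≤ T.length - k2 := by
          rw [hc]; have := lcp_le_right T (T.drop k2); simpa using this
        -- characters copied through the [l, r] window
        have hcopy : ∀ s, s < lcp T (T.drop l) → T.getD s ' ' = T.getD (l + s) ' ' :=
          fun s hs => lcp_getD' T l s hs
        have hck : ∀ t, t < c → T.getD t ' ' = T.getD (k2 + t) ' ' := by
          intro t ht
          exact lcp_getD' T k2 t (by rw [← hc]; exact ht)
        rcases Decidable.em (c < r - k + 1) with hlt | hge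
        · simp only [hlt, if_true]
          -- Z[k] := Z[k2] is correct
          have hmain : lcp T (T.drop k) = c := by
            have hpoint : ∀ t, t < c → T.getD t ' ' = (T.drop k).getD t ' ' := by
              intro t ht
              rw [getD_drop]
              rw [hck t ht]
              have h1 : k2 + t < lcp T (T.drop l) := by omega
              have := hcopy (k2 + t) h1
              rw [this]
              congr 1
              omega
            have hmis : T.getD c ' ' ≠ (T.drop k).getD c ' ' := by
              rw [getD_drop]
              have hcn : c < T.length - k2 := by omega
              have hmm := lcp_mismatch T (T.drop k2)
                (by rw [← hc]; omega)
                (by rw [List.length_drop, ← hc]; omega) ' '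
              rw [getD_drop] at hmm
              rw [← hc] at hmm
              intro he; apply hmm
              have h1 : k2 + c < lcp T (T.drop l) := by omega
              have := hcopy (k2 + c) h1
              rw [this]
              rw [he]
              congr 1
              omega
            apply lcp_eq c T (T.drop k) (by omega) (by rw [List.length_drop]; omega) hpoint
            exact Or.inr (Or.inr hmis)
          apply ih (k+1) (by omega) _ _ _ (by omega)
            (ZGood_set T Z k hkn hg _ hmain.symm)
          exact Or.inr ⟨hl1, by omega, hlr, hrL⟩
        · simp only [hge, if_false]
          -- Z[k] := zExtend from r-k+1
          have hpoint : ∀ t, t < r - k + 1 → T.getD t ' ' = (T.drop k).getD t ' ' := by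
            intro t ht
            rw [getD_drop]
            rw [hck t (by omega)]
            have h1 : k2 + t < lcp T (T.drop l) := by omega
            rw [hcopy (k2 + t) h1]
            congr 1
            omega
          have hmain : zExtend T k (r - k + 1) = lcp T (T.drop k) := by
            rw [zExtend_spec T k hk (r - k + 1)]
            have hadd := lcp_add (r - k + 1) T (T.drop k) (by omega)
              (by rw [List.length_drop]; omega) hpoint
            have hd : (T.drop k).drop (r - k + 1) = T.drop (k + (r - k + 1)) := by
              rw [List.drop_drop]
            rw [hadd, hd]
          have hz1 : 1 ≤ zExtend T k (r - k + 1) := by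
            rw [zExtend_spec T k hk (r - k + 1)]; omega
          apply ih (k+1) (by omega) _ _ _ (by omega)
            (ZGood_set T Z k hkn hg _ hmain)
          right
          refine ⟨by omega, by omega, by omega, ?_⟩
          rw [← hmain]
          omega
    · simp only [hkn, if_false]
      exact ⟨hg.1, fun m hm => hg.2 m (by omega)⟩

theorem Z_algo_correct (T : List Char) (hT : 1 ≤ T.length) (m : Nat) (hm : m < T.length) :
    (Z_algo T).getD m 0 = lcp T (T.drop m) := by
  have hg : ZGood T ((List.replicate T.length 0).set 0 T.length) 1 := by
    refine ⟨by simp, fun m hm0 => ?_⟩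
    have : m = 0 := by omega
    subst this
    rw [getD_set_self _ 0 _ (by simpa using hT)]
    simp [lcp_refl]
  have := zLoop_good T (T.length - 1) 1 (by omega) _ 0 0 (by omega) hg (Or.inl ⟨rfl, rfl⟩)
  exact this.2 m hm

theorem zLoop_length (T : List Char) (fuel : Nat) : ∀ (k : Nat), T.length - k ≤ fuel →
    ∀ (Z : List Nat) (l r : Nat), (zLoop T T.length k Z l r).length = Z.length := by
  induction fuel with
  | zero =>
    intro k hf Z l r
    rw [zLoop]
    have : ¬ (k < T.length) := by omega
    simp [this]
  | succ fuel ih =>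
    intro k hf Z l r
    rw [zLoop]
    rcases Decidable.em (k < T.length) with hkn | hkn
    · simp only [hkn, if_true]
      rcases Decidable.em (r < k) with hrk | hrk
      · simp only [hrk, if_true]; rw [ih (k+1) (by omega)]; simp
      · simp only [hrk, if_false]
        rcases Decidable.em (Z.getD (k - l) 0 < r - k + 1) with h2 | h2
        · simp only [h2, if_true]; rw [ih (k+1) (by omega)]; simp
        · simp only [h2, if_false]; rw [ih (k+1) (by omega)]; simp
    · simp [hkn]

theorem Z_algo_length (T : List Char) : (Z_algo T).length = T.length := by
  unfold Z_algo
  rw [zLoop_length T (T.length - 1) 1 (by omega)]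
  simp

def cnt (bl u : List Char) : Nat :=
  if h : bl ≠ [] ∧ bl.isPrefixOf u then cnt bl (u.drop bl.length) + 1 else 0
termination_by u.length
decreasing_by
  have h1 : bl.length ≤ u.length := (List.isPrefixOf_iff_prefix.mp h.2).length_le
  have h2 : 0 < bl.length := List.length_pos_iff.mpr h.1
  simp only [List.length_drop]; omega

def repFlat (q : Nat) (bl : List Char) : List Char := (List.replicate q bl).flatten

theorem repFlat_succ (q : Nat) (bl : List Char) : repFlat (q + 1) bl = bl ++ repFlat q bl := by
  simp [repFlat, List.replicate_succ]

theorem repFlat_length (q : Nat) (bl : List Char) : (repFlat q bl).length = q * bl.length := by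
  induction q with
  | zero => simp [repFlat]
  | succ q ih => rw [repFlat_succ]; simp [ih]; ring

theorem lcp_append_left (u v w : List Char) (h : u.length ≤ v.length) :
    lcp (v ++ w) u = lcp v u := by
  induction u generalizing v with
  | nil => simp [lcp_nil_right]
  | cons a as ih =>
    cases v with
    | nil => simp at h
    | cons b bs =>
      simp only [List.cons_append, lcp]
      rw [ih bs (by simpa using h)]

theorem lcp_rep_div (bl : List Char) (p q : Nat) (hp : p = bl.length) (hp1 : 1 ≤ p) :
    ∀ (u : List Char), u.length ≤ p * q → lcp (repFlat q bl) u / p = cnt bl u := by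
  induction q with
  | zero =>
    intro u hu
    have : u = [] := by
      have : u.length = 0 := by omega
      exact List.length_eq_zero_iff.mp this
    subst this
    rw [lcp_nil_right, cnt]
    simp
  | succ q ih =>
    intro u hu
    have hbl : bl ≠ [] := by
      intro h; rw [h] at hp; simp at hp; omega
    rcases Decidable.em (bl.isPrefixOf u) with hpre | hpre
    · have hpre' : bl <+: u := List.isPrefixOf_iff_prefix.mp hpre
      have hlen : p ≤ u.length := hp ▸ hpre'.length_le
      have htake : u.take p = bl := by
        rw [hp]; exact (List.prefix_iff_eq_take.mp hpre').symm
      have hpoint : ∀ t, t < p → (repFlat (q+1) bl).getD t ' ' = u.getD t ' ' := by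
        intro t ht
        rw [repFlat_succ]
        have h1 : (bl ++ repFlat q bl).getD t ' ' = bl.getD t ' ' := by
          simp [List.getD, List.getElem?_append_left (by omega : t < bl.length)]
        rw [h1]
        have h2 : u.getD t ' ' = (u.take p).getD t ' ' := by
          simp [List.getD, List.getElem?_take, ht]
        rw [h2, htake]
      have hadd := lcp_add p (repFlat (q+1) bl) u
        (by rw [repFlat_length, ← hp]; exact Nat.le_mul_of_pos_left p (by omega)) hlen hpoint
      rw [hadd]
      have hdrop : (repFlat (q+1) bl).drop p = repFlat q bl := by
        rw [repFlat_succ, hp, List.drop_append_of_le_length (by omega), List.drop_length]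
        simp
      rw [hdrop]
      have hmul : p * (q + 1) = p * q + p := by ring
      have ihu := ih (u.drop p) (by rw [List.length_drop]; omega)
      rw [Nat.add_div_left _ (by omega : 0 < p), ihu]
      conv_rhs => rw [cnt]
      rw [dif_pos ⟨hbl, hpre⟩, ← hp]
    · rw [cnt]
      have : ¬ (bl ≠ [] ∧ bl.isPrefixOf u) := by simp [hpre]
      rw [dif_neg this]
      have hlt : lcp (repFlat (q+1) bl) u < p := by
        by_contra hge
        rw [Nat.not_lt] at hge
        have hul : p ≤ u.length := le_trans hge (lcp_le_right _ _)
        have htake : u.take p = bl := by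
          apply List.ext_getElem
          · simp [hp]; omega
          · intro i h1 h2
            have hi : i < p := by simp at h1; omega
            have := lcp_getD (repFlat (q+1) bl) u i (by omega) ' '
            have hrep : (repFlat (q+1) bl).getD i ' ' = bl.getD i ' ' := by
              rw [repFlat_succ]
              simp [List.getD, List.getElem?_append_left (by omega : i < bl.length)]
            rw [hrep] at this
            have hgu : u.getD i ' ' = u[i]'(by omega) := by
              simp [List.getD, List.getElem?_eq_getElem (by omega : i < u.length)]
            have hgb : bl.getD i ' ' = bl[i]'(by omega) := by
              simp [List.getD, List.getElem?_eq_getElem (by omega : i < bl.length)]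
            rw [hgu, hgb] at this
            simp only [List.getElem_take]
            exact this.symm
        rw [hp] at htake
        exact hpre (List.isPrefixOf_iff_prefix.mpr (List.prefix_iff_eq_take.mpr htake.symm))
      exact Nat.div_eq_of_lt hlt

theorem occAt_iff (Sl bl : List Char) (p j : Nat) (hp : p = bl.length) :
    occAt Sl bl p j = true ↔ bl.isPrefixOf (Sl.drop j) := by
  unfold occAt
  rw [beq_iff_eq]
  constructor
  · intro h
    apply List.isPrefixOf_iff_prefix.mpr
    apply List.prefix_iff_eq_take.mpr
    rw [← hp, h.symm]
  · intro h
    have := List.prefix_iff_eq_take.mp (List.isPrefixOf_iff_prefix.mp h)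
    rw [← hp] at this
    exact this.symm

theorem cnt_nil (bl : List Char) (hbl : bl ≠ []) : cnt bl [] = 0 := by
  rw [cnt]
  have : ¬ (bl ≠ [] ∧ bl.isPrefixOf ([] : List Char)) := by
    rintro ⟨h1, h2⟩
    have := (List.isPrefixOf_iff_prefix.mp h2).length_le
    simp at this
    exact h1 this
  rw [dif_neg this]

theorem buildCount_spec (Sl bl : List Char) (p : Nat) (hp : p = bl.length) (hp1 : 1 ≤ p) :
    ∀ (j : Nat), j ≤ Sl.length → ∀ (C : List Nat), C.length = Sl.length + p →
    (∀ m, j ≤ m → C.getD m 0 = cnt bl (Sl.drop m)) →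
    (∀ m, m < j → C.getD m 0 = 0) →
    ∀ m, (buildCount Sl bl p j C).getD m 0 = cnt bl (Sl.drop m) := by
  have hbl : bl ≠ [] := by
    intro h; rw [h] at hp; simp at hp; omega
  intro j
  induction j with
  | zero =>
    intro _ C _ habove _ m
    rw [buildCount]
    exact habove m (by omega)
  | succ j ih =>
    intro hj C hlen habove hbelow m
    rw [buildCount]
    rcases Decidable.em (occAt Sl bl p j = true) with hocc | hocc
    · rw [if_pos hocc]
      have hpre := (occAt_iff Sl bl p j hp).mp hocc
      have hcj : cnt bl (Sl.drop j) = 1 + C.getD (j + p) 0 := by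
        rw [cnt, dif_pos ⟨hbl, hpre⟩]
        rw [List.drop_drop, ← hp]
        rw [habove (j + p) (by omega)]
        omega
      apply ih (by omega)
      · simpa using hlen
      · intro m2 hm2
        rcases Decidable.em (m2 = j) with rfl | hne
        · rw [getD_set_self C m2 _ (by omega), hcj]
        · rw [getD_set_ne C j m2 _ hne]
          exact habove m2 (by omega)
      · intro m2 hm2
        rw [getD_set_ne C j m2 _ (by omega)]
        exact hbelow m2 (by omega)
    · rw [if_neg hocc]
      have hcj : cnt bl (Sl.drop j) = 0 := by
        rw [cnt]
        have : ¬ (bl ≠ [] ∧ bl.isPrefixOf (Sl.drop j)) := by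
          rintro ⟨h1, h2⟩
          exact hocc ((occAt_iff Sl bl p j hp).mpr h2)
        rw [dif_neg this]
      apply ih (by omega) C hlen
      · intro m2 hm2
        rcases Decidable.em (m2 = j) with rfl | hne
        · rw [hbelow m2 (by omega), hcj]
        · exact habove m2 (by omega)
      · intro m2 hm2
        exact hbelow m2 (by omega)

theorem loops_eq (Z C : List Nat) (p base n : Nat) (hp : 1 ≤ p)
    (hv : ∀ m, m < n → Z.getD (base + m) 0 / p = C.getD m 0) (fuel : Nat) :
    ∀ (j : Nat), n - j ≤ fuel → ∀ (ms : List (Int × Int)) (pA rA pB rB : Int),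
    ((pA = -1 ∧ rA = -1 ∧ pB = -1 ∧ rB = -1) ∨
     (pA = pB + base ∧ rA = rB + base ∧ 0 ≤ pB ∧ 0 ≤ rB)) →
    aLoop Z p base (base + n) (base + j) ms pA rA = bLoop C p n j ms pB rB := by
  induction fuel with
  | zero =>
    intro j hf ms pA rA pB rB hrel
    rw [aLoop, bLoop]
    have h1 : ¬ (base + j < base + n) := by omega
    have h2 : ¬ (j < n) := by omega
    simp [h1, h2]
  | succ fuel ih =>
    intro j hf ms pA rA pB rB hrel
    rw [aLoop, bLoop]
    rcases Decidable.em (j < n) with hj | hj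
    · have hj' : base + j < base + n := by omega
      simp only [hj, hj', if_true]
      have hzc : Z.getD (base + j) 0 / p = C.getD j 0 := hv j hj
      set zi := Z.getD (base + j) 0 with hzi
      set cj := C.getD j 0 with hcj
      have hend : zi - zi % p = cj * p := by
        have hdm := Nat.div_add_mod zi p
        have hcomm : p * (zi / p) = zi / p * p := Nat.mul_comm _ _
        rw [← hzc]
        omega
      rcases Decidable.em (1 < cj) with hbig | hbig
      · have hbig' : 1 < zi / p := by rw [hzc]; exact hbig
        simp only [hbig, hbig', if_true, hend, hzc]
        have hpair : ((base + j : Nat) : Int) - (base : Int) = (j : Int) := by push_cast; ring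
        rcases hrel with ⟨e1, e2, e3, e4⟩ | ⟨e1, e2, e3, e4⟩
        · have hc1 : ((base + j : Nat) : Int) + ((cj * p : Nat) : Int) > rA := by
            rw [e2]; omega
          have hc2 : ((j : Nat) : Int) + ((cj * p : Nat) : Int) > rB := by
            rw [e4]; omega
          simp only [hc1, hc2, if_true, hpair]
          apply ih (j + 1) (by omega)
          right
          refine ⟨by push_cast; ring, by push_cast; ring, by positivity, by positivity⟩
        · have hcond : (((base + j : Nat) : Int) + ((cj * p : Nat) : Int) > rA) ↔
              (((j : Nat) : Int) + ((cj * p : Nat) : Int) > rB) := by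
            rw [e2]; constructor <;> (intro h; push_cast at h ⊢; omega)
          rcases Decidable.em (((j : Nat) : Int) + ((cj * p : Nat) : Int) > rB) with hgt | hgt
          · have hgt' := hcond.mpr hgt
            simp only [hgt, hgt', if_true, hpair]
            apply ih (j + 1) (by omega)
            right
            refine ⟨by push_cast; ring, by push_cast; ring, by positivity, ?_⟩
            have : (0 : Int) ≤ ((cj * p : Nat) : Int) := by positivity
            omega
          · have hgt' : ¬ (((base + j : Nat) : Int) + ((cj * p : Nat) : Int) > rA) :=
              fun h => hgt (hcond.mp h)
            simp only [hgt, hgt', if_false]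
            have helif : (((base + j : Nat) : Int) - pA < (p : Int)) ↔
                (((j : Nat) : Int) - pB < (p : Int)) := by
              rw [e1]; constructor <;> (intro h; push_cast at h ⊢; omega)
            rcases Decidable.em (((j : Nat) : Int) - pB < (p : Int)) with hel | hel
            · have hel' := helif.mpr hel
              simp only [hel, hel', if_true, hpair]
              apply ih (j + 1) (by omega)
              right
              exact ⟨e1, e2, e3, e4⟩
            · have hel' : ¬ (((base + j : Nat) : Int) - pA < (p : Int)) :=
                fun h => hel (helif.mp h)
              simp only [hel, hel', if_false]
              apply ih (j + 1) (by omega)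
              right
              exact ⟨e1, e2, e3, e4⟩
      · have hbig' : ¬ (1 < zi / p) := by rw [hzc]; exact hbig
        simp only [hbig, hbig', if_false]
        exact ih (j + 1) (by omega) ms pA rA pB rB hrel
    · have hj' : ¬ (base + j < base + n) := by omega
      simp [hj, hj']

theorem main_eq (beta S : String) (hpre : beta ≠ "") :
    find_maximal_tandem beta S = find_maximal_tandem_alt beta S := by
  have hbl : beta.toList ≠ [] := by simpa [String.toList_eq_nil_iff] using hpre
  simp only [find_maximal_tandem, find_maximal_tandem_alt]
  set Sl := S.toList with hSl
  set bl := beta.toList with hbldef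
  set n := Sl.length with hn
  set p := bl.length with hpdef
  have hp1 : 1 ≤ p := by
    rw [hpdef]; exact List.length_pos_iff.mpr hbl
  set q := (n + p - 1) / p with hq
  set T := (List.replicate q bl).flatten ++ '#' :: Sl with hT
  have hrepT : (List.replicate q bl).flatten = repFlat q bl := rfl
  have hreplen : (repFlat q bl).length = q * p := by rw [repFlat_length, hpdef]
  have hnpq : n ≤ p * q := by
    have hdm := Nat.div_add_mod (n + p - 1) p
    have hmod : (n + p - 1) % p < p := Nat.mod_lt _ (by omega)
    have : p * q = p * ((n + p - 1) / p) := by rw [hq]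
    omega
  have hTlen : T.length = p * q + 1 + n := by
    rw [hT]; simp [hrepT, hreplen]; ring
  have hcm : p * q = q * p := Nat.mul_comm _ _
  set base := p * q + 1 with hbase
  have hZlen : (Z_algo T).length = base + n := by
    rw [Z_algo_length, hTlen]
  set C := buildCount Sl bl p n (List.replicate (n + p) 0) with hC
  have hCspec : ∀ m, C.getD m 0 = cnt bl (Sl.drop m) := by
    apply buildCount_spec Sl bl p hpdef hp1 n (by omega)
    · simp only [List.length_replicate]; omega
    · intro m hm
      have hdrop : Sl.drop m = [] := List.drop_eq_nil_of_le (by omega)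
      rw [hdrop, cnt_nil bl hbl]
      simp [List.getD, List.getElem?_replicate]
      split <;> simp
    · intro m hm
      simp [List.getD, List.getElem?_replicate]
      split <;> simp
  have hv : ∀ m, m < n → (Z_algo T).getD (base + m) 0 / p = C.getD m 0 := by
    intro m hm
    have h1 : (Z_algo T).getD (base + m) 0 = lcp T (T.drop (base + m)) :=
      Z_algo_correct T (by omega) (base + m) (by omega)
    have h2 : T.drop (base + m) = Sl.drop m := by
      rw [hT, hrepT]
      have hidx : base + m = (repFlat q bl).length + (1 + m) := by rw [hreplen]; omega
      rw [hidx]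
      have e1 : List.drop ((repFlat q bl).length + (1 + m)) (repFlat q bl) = [] :=
        List.drop_eq_nil_of_le (by omega)
      rw [List.drop_append, e1, List.nil_append, Nat.add_sub_cancel_left]
      have e2 : 1 + m = m + 1 := by omega
      rw [e2, List.drop_succ_cons]
    have h3 : lcp T (Sl.drop m) = lcp (repFlat q bl) (Sl.drop m) := by
      rw [hT, hrepT]
      apply lcp_append_left
      rw [List.length_drop, hreplen]
      omega
    rw [h1, h2, h3, hCspec m]
    apply lcp_rep_div bl p q hpdef hp1
    rw [List.length_drop]
    omega
  have := loops_eq (Z_algo T) C p base n hp1 hv n 0 (by omega) [] (-1) (-1) (-1) (-1)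
    (Or.inl ⟨rfl, rfl, rfl, rfl⟩)
  rw [hZlen]
  simpa using this

-- ===== VERDICT (by name: the statement is the Claim_ definition above) =====
theorem find_maximal_tandem_spec : Claim_equal_find_maximal_tandem := by
  intro beta S _ hpre
  unfold Spec_find_maximal_tandem
  exact main_eq beta S hpre
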